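-- pv_equiv track=rewrite | github.com/FrdMnhdl/Farid-Munadhil_EISD_Software-Development | soal9.py | anak_nakal
-- ===== SOURCE A (Python) =====
-- from collections import Counter
--
-- def anak_nakal(data):
--     hitung = Counter(data)
--     if not hitung:
--         return "Semuanya anak baik"
--     paling_banyak = hitung.most_common()
--     jumlah_terbanyak = paling_banyak[0][1]
--     hasil = []
--     for nama, jumlah in paling_banyak:
--         if jumlah == jumlah_terbanyak:
--             hasil.append(f"{nama} Nackal")
--     if hasil:
--         return ", ".join(hasil)
--     else:
--         return "Semuanya anak baik"
-- ===== SOURCE B (Python) =====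
-- def anak_nakal(data):
--     counts = {}
--     for x in data:
--         counts[x] = counts.get(x, 0) + 1
--     buckets = {}
--     for nama, c in counts.items():
--         buckets.setdefault(c, []).append(nama)
--     if not buckets:
--         return "Semuanya anak baik"
--     top = buckets[max(buckets)]
--     return ", ".join(nama + " Nackal" for nama in top)
-- ===== Notes on version B (the rewrite author's own statement) =====
-- stated objective: alternative
-- what changed: B builds an inverted index (count -> list of names in first-appearance order) instead of sorting with most_common(): the answer is read off directly as the bucket of the maximum count, with no sort and no filtering pass over all names.
import Mathlib
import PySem

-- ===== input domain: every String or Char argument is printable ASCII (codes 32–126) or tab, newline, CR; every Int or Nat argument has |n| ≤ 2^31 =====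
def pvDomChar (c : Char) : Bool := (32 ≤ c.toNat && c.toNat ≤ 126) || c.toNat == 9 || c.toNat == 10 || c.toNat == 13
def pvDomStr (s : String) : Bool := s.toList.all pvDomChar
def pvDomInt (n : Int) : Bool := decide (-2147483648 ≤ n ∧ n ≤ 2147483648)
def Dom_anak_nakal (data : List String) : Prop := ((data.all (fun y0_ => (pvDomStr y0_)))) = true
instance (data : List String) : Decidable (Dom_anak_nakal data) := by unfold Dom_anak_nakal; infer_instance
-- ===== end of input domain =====

-- B replaces A's most_common() sort by an inverted index (count -> names bucket); the answer is the bucket of the maximum count.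

-- ===== PORT A =====
def anak_nakal (data : List String) : String :=
  let hitung : PySem.Dict String Int := PySem.Dict.counter data
  if hitung.items.isEmpty then "Semuanya anak baik"
  else
    let paling_banyak := PySem.List.sorted hitung.items (fun p => p.2) true
    -- paling_banyak[0][1]: exact here, the list is nonempty under this branch (headI = [0])
    let jumlah_terbanyak := (paling_banyak.headI).2
    let hasil := paling_banyak.foldl
      (fun acc p => if p.2 == jumlah_terbanyak then acc ++ [p.1 ++ " Nackal"] else acc) []
    if hasil.isEmpty then "Semuanya anak baik" else PySem.Str.join ", " hasil

-- ===== PORT B =====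
def anak_nakal_alt (data : List String) : String :=
  let counts : PySem.Dict String Int :=
    data.foldl (fun d x => d.insert x (d.getD x 0 + 1)) PySem.Dict.empty
  let buckets : PySem.Dict Int (List String) :=
    counts.items.foldl (fun d p => d.modify p.2 [] (fun l => l ++ [p.1])) PySem.Dict.empty
  if buckets.items.isEmpty then "Semuanya anak baik"
  else
    -- buckets[max(buckets)]: exact here, max(buckets) is a key of the nonempty buckets, no KeyError
    let top := buckets.getD ((PySem.List.max? buckets.keys (fun v => v)).getD 0) []
    PySem.Str.join ", " (top.map (fun nama => nama ++ " Nackal"))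

-- ===== PRECONDITION & SPEC =====
def Spec_anak_nakal (data : List String) (out : String) : Prop := out = anak_nakal_alt data
instance (data : List String) (out : String) : Decidable (Spec_anak_nakal data out) := by unfold Spec_anak_nakal; infer_instance

-- ===== CLAIM (what is proved, stated in full; the proofs are below) =====
def Claim_equal_anak_nakal : Prop := ∀ (data : List String), Dom_anak_nakal data → Spec_anak_nakal data (anak_nakal data)

-- ===== LEMMAS AND PROOFS =====

-- descending order is preserved by PySem's (reverse) insertion step
lemma pairwise_insertBy_desc (x : String × Int) (acc : List (String × Int))
    (h : acc.Pairwise (fun a b => b.2 ≤ a.2)) :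
    (PySem.List.insertBy (fun a b => decide (b.2 < a.2)) x acc).Pairwise (fun a b => b.2 ≤ a.2) := by
  induction acc with
  | nil => simp [PySem.List.insertBy]
  | cons y t ih =>
    rcases List.pairwise_cons.mp h with ⟨hy, ht⟩
    by_cases hlt : y.2 < x.2
    · simp only [PySem.List.insertBy, hlt, decide_true, if_true]
      refine List.pairwise_cons.mpr ⟨?_, List.pairwise_cons.mpr ⟨hy, ht⟩⟩
      intro z hz
      rcases List.mem_cons.mp hz with rfl | hz
      · exact le_of_lt hlt
      · exact le_trans (hy z hz) (le_of_lt hlt)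
    · simp only [PySem.List.insertBy, hlt, decide_false]
      refine List.pairwise_cons.mpr ⟨?_, ih ht⟩
      intro z hz
      rcases (PySem.List.mem_insertBy _ x z t).mp hz with rfl | hz
      · exact le_of_not_gt hlt
      · exact hy z hz

-- filtering for the maximum key commutes with one stable descending insertion
lemma filter_insertBy_max (c : Int) (x : String × Int) (acc : List (String × Int))
    (hacc : acc.Pairwise (fun a b => b.2 ≤ a.2)) (hle : ∀ y ∈ acc, y.2 ≤ c) :
    (PySem.List.insertBy (fun a b => decide (b.2 < a.2)) x acc).filter (fun y => y.2 == c)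
      = acc.filter (fun y => y.2 == c) ++ (if x.2 == c then [x] else []) := by
  induction acc with
  | nil => by_cases hxc : x.2 = c <;> simp [PySem.List.insertBy, hxc]
  | cons y t ih =>
    rcases List.pairwise_cons.mp hacc with ⟨hy, ht⟩
    by_cases hlt : y.2 < x.2
    · simp only [PySem.List.insertBy, hlt, decide_true, if_true]
      by_cases hxc : x.2 = c
      · have hfilt : (y :: t).filter (fun z => z.2 == c) = [] := by
          rw [List.filter_eq_nil_iff]
          intro z hz
          rcases List.mem_cons.mp hz with rfl | hz
          · simp; omega
          · have := hy z hz; simp; omega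
        rw [List.filter_cons_of_pos (by simp [hxc]), hfilt, if_pos (by simp [hxc])]
        simp
      · rw [List.filter_cons_of_neg (by simp [hxc]), if_neg (by simp [hxc])]
        simp
    · simp only [PySem.List.insertBy, hlt, decide_false, Bool.false_eq_true, if_false]
      have hrec := ih ht (fun z hz => hle z (List.mem_cons_of_mem y hz))
      by_cases hyc : y.2 = c
      · rw [List.filter_cons_of_pos (by simp [hyc]), List.filter_cons_of_pos (by simp [hyc]),
            hrec, List.cons_append]
      · rw [List.filter_cons_of_neg (by simp [hyc]), List.filter_cons_of_neg (by simp [hyc]), hrec]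

-- the whole insertion-sort fold: filtering for the maximum key gives the original order
lemma foldl_insertBy_filter_max (c : Int) (xs : List (String × Int)) (acc : List (String × Int))
    (hacc : acc.Pairwise (fun a b => b.2 ≤ a.2)) (hleacc : ∀ y ∈ acc, y.2 ≤ c)
    (hlexs : ∀ y ∈ xs, y.2 ≤ c) :
    ((xs.foldl (fun a x => PySem.List.insertBy (fun a b => decide (b.2 < a.2)) x a) acc).filter
        (fun y => y.2 == c))
      = acc.filter (fun y => y.2 == c) ++ xs.filter (fun y => y.2 == c) := by
  induction xs generalizing acc with
  | nil => simp
  | cons z zs ih =>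
    simp only [List.foldl_cons]
    have h1 := pairwise_insertBy_desc z acc hacc
    have h2 : ∀ w ∈ PySem.List.insertBy (fun a b => decide (b.2 < a.2)) z acc, w.2 ≤ c := by
      intro w hw
      rcases (PySem.List.mem_insertBy _ z w acc).mp hw with rfl | hw
      · exact hlexs _ List.mem_cons_self
      · exact hleacc w hw
    have h3 : ∀ w ∈ zs, w.2 ≤ c := fun w hw => hlexs w (List.mem_cons_of_mem z hw)
    rw [ih (PySem.List.insertBy (fun a b => decide (b.2 < a.2)) z acc) h1 h2 h3]
    rw [filter_insertBy_max c z acc hacc hleacc]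
    by_cases hzc : z.2 = c
    · rw [List.filter_cons_of_pos (by simp [hzc]), if_pos (by simp [hzc])]
      simp
    · rw [List.filter_cons_of_neg (by simp [hzc]), if_neg (by simp [hzc])]
      simp

-- the bucket of a count c holds exactly the names with count c, in items order
lemma bucket_getD (L : List (String × Int)) (c : Int) :
    (L.foldl (fun d p => d.modify p.2 [] (fun l => l ++ [p.1]))
        (PySem.Dict.empty : PySem.Dict Int (List String))).getD c []
      = (L.filter (fun p => p.2 == c)).map (fun p => p.1) := by
  have hmap : L.foldl (fun d p => d.modify p.2 [] (fun l => l ++ [p.1]))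
        (PySem.Dict.empty : PySem.Dict Int (List String))
      = (L.map Prod.swap).foldl (fun d q => d.modify q.1 [] (fun l => l ++ [q.2]))
        PySem.Dict.empty := by
    rw [List.foldl_map]; rfl
  rw [hmap, PySem.Dict.getD_foldl_modify_append, PySem.Dict.getD_empty, List.filter_map]
  simp only [List.nil_append, List.map_map]
  rfl

-- the keys of the bucket dict are the distinct counts
lemma bucket_keys (L : List (String × Int)) :
    (L.foldl (fun d p => d.modify p.2 [] (fun l => l ++ [p.1]))
        (PySem.Dict.empty : PySem.Dict Int (List String))).keys
      = PySem.Set.ofList (L.map (fun p => p.2)) := by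
  have hmap : L.foldl (fun d p => d.modify p.2 [] (fun l => l ++ [p.1]))
        (PySem.Dict.empty : PySem.Dict Int (List String))
      = (L.map Prod.swap).foldl (fun d q => d.modify q.1 [] (fun l => l ++ [q.2]))
        PySem.Dict.empty := by
    rw [List.foldl_map]; rfl
  rw [hmap]
  have := PySem.Dict.keys_foldl_modify_key (l := L.map Prod.swap) (key := Prod.fst)
      (d0 := ([] : List String)) (f := fun d q l => l ++ [q.2]) (d := PySem.Dict.empty)
  -- the step 'd.modify q.1 [] (· ++ [q.2])' is the keyed-modify shape with key = Prod.fst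
  rw [this, PySem.Dict.keys_empty, PySem.Set.update_nil_left, List.map_map]
  rfl

theorem anak_nakal_spec : Claim_equal_anak_nakal := by
  intro data _
  unfold Spec_anak_nakal anak_nakal anak_nakal_alt
  have hcounts : data.foldl (fun d x => d.insert x (d.getD x 0 + 1))
      (PySem.Dict.empty : PySem.Dict String Int) = PySem.Dict.counter data := rfl
  rw [hcounts]
  dsimp only
  set L := (PySem.Dict.counter (κ := String) data).items with hL
  set B := L.foldl (fun d p => d.modify p.2 [] (fun l => l ++ [p.1]))
      (PySem.Dict.empty : PySem.Dict Int (List String)) with hB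
  by_cases hne : L = []
  · -- empty input: both take their default branch
    have hBempty : B = PySem.Dict.empty := by rw [hB, hne]; rfl
    simp [hne, hBempty, PySem.Dict.empty]
  · have hempf : L.isEmpty = false := by simpa [List.isEmpty_iff] using hne
    have hBkeys : B.keys = PySem.Set.ofList (L.map (fun p => p.2)) := bucket_keys L
    have hBkeysne : B.keys ≠ [] := by
      rw [hBkeys]
      cases hLc : L with
      | nil => exact absurd hLc hne
      | cons a t => simp [PySem.Set.ofList_cons]
    have hBitemsne : B.items ≠ [] := by
      intro h
      apply hBkeysne
      have : B.keys = B.items.map (fun p => p.1) := rfl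
      rw [this, h]; rfl
    have hBempf : B.items.isEmpty = false := by simpa [List.isEmpty_iff] using hBitemsne
    rw [hempf, hBempf]
    simp only [Bool.false_eq_true, if_false]
    obtain ⟨m, t, hsorted⟩ : ∃ m t,
        PySem.List.sorted L (fun p => p.2) true = m :: t := by
      cases hs : PySem.List.sorted L (fun p => p.2) true with
      | nil => exact absurd ((PySem.List.sorted_eq_nil_iff _ _ _).mp hs) hne
      | cons m t => exact ⟨m, t, rfl⟩
    have hmax : ∀ y ∈ L, y.2 ≤ m.2 :=
      PySem.List.key_head_sorted_rev_ge L (fun p : String × Int => p.2) hsorted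
    have hmmem : m ∈ L := by
      have hm : m ∈ PySem.List.sorted L (fun p => p.2) true := by
        rw [hsorted]; exact List.mem_cons_self
      exact (PySem.List.mem_sorted _ _ _ _).mp hm
    -- B's max over bucket keys equals A's top count m.2
    obtain ⟨v, hv⟩ : ∃ v, PySem.List.max? B.keys (fun v => v) = some v := by
      cases hv : PySem.List.max? B.keys (fun v => v) with
      | none => exact absurd ((PySem.List.max?_eq_none_iff _ _).mp hv) hBkeysne
      | some v => exact ⟨v, rfl⟩
    have hveq : v = m.2 := by
      have h1 : m.2 ≤ v := by
        have hmk : m.2 ∈ B.keys := by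
          rw [hBkeys]
          exact (PySem.Set.mem_ofList _ _).mpr (List.mem_map_of_mem hmmem)
        simpa using PySem.List.max?_isMax hv m.2 hmk
      have h2 : v ≤ m.2 := by
        have hvmem := PySem.List.max?_mem hv
        rw [hBkeys] at hvmem
        obtain ⟨p, hp, rfl⟩ := List.mem_map.mp ((PySem.Set.mem_ofList _ _).mp hvmem)
        exact hmax p hp
      omega
    rw [hv]
    simp only [Option.getD_some, hveq]
    -- A's loop is a filter+map over the sorted list
    rw [hsorted]
    have hheadI : (m :: t).headI = m := rfl
    rw [hheadI, PySem.List.foldl_append_if (fun q : String × Int => q.2 == m.2) (fun q : String × Int => q.1 ++ " Nackal")]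
    -- stability: filtering the sorted list for the top count gives the original item order
    have hfilt : (m :: t).filter (fun p => p.2 == m.2) = L.filter (fun p => p.2 == m.2) := by
      have hfold := foldl_insertBy_filter_max m.2 L [] (by simp) (by simp) hmax
      rw [← PySem.List.sorted_rev_eq_foldl_insertBy L (fun p : String × Int => p.2), hsorted] at hfold
      simpa using hfold
    rw [hfilt]
    -- A's hasil is nonempty: m survives the filter
    have hmemf : m ∈ L.filter (fun p => p.2 == m.2) :=
      List.mem_filter.mpr ⟨hmmem, by simp⟩
    have hnef : (([] : List String) ++
        (L.filter (fun p => p.2 == m.2)).map (fun p => p.1 ++ " Nackal")).isEmpty = false := by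
      simp only [List.nil_append, List.isEmpty_eq_false_iff_exists_mem]
      exact ⟨m.1 ++ " Nackal", List.mem_map_of_mem hmemf⟩
    rw [hnef]
    simp only [Bool.false_eq_true, if_false, List.nil_append]
    -- B's bucket of m.2 is that same filtered list's names
    rw [bucket_getD L m.2, List.map_map]
    rfl
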